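-- pv_equiv track=rewrite | github.com/suu00k1459/Algorithm | 프로그래머스/1/42840. 모의고사/모의고사.py | solution
-- ===== SOURCE A (Python) =====
-- import math
--
-- def solution(ans):
--     a = [1,2,3,4,5]
--     b = [2, 1, 2, 3, 2, 4, 2, 5]
--     c = [3, 3, 1, 1, 2, 2, 4, 4, 5, 5]
--
--     a = (a*math.ceil(len(ans)/len(a)))[:len(ans)]
--     b = (b*math.ceil(len(ans)/len(b)))[:len(ans)]
--     c = (c*math.ceil(len(ans)/len(c)))[:len(ans)]
--
--     dct ={1:0,2:0,3:0}
--
--     for i in range(len(ans)):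
--         if ans[i] == a[i]:
--             dct[1]+=1
--         if ans[i] == b[i]:
--             dct[2]+=1
--         if ans[i] == c[i]:
--             dct[3]+=1
--
--     return [k for k, v in dct.items() if v == max(dct.values())]
-- ===== SOURCE B (Python) =====
-- def solution(ans):
--     patterns = [[1, 2, 3, 4, 5],
--                 [2, 1, 2, 3, 2, 4, 2, 5],
--                 [3, 3, 1, 1, 2, 2, 4, 4, 5, 5]]
--     L = 40  # common period of the three patterns (lcm of 5, 8, 10)
--     cnt = {}
--     for i, x in enumerate(ans):
--         key = (i % L, x)
--         cnt[key] = cnt.get(key, 0) + 1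
--     scores = [sum(cnt.get((r, p[r % len(p)]), 0) for r in range(L))
--               for p in patterns]
--     best = max(scores)
--     return [k + 1 for k in range(3) if scores[k] == best]
-- ===== Notes on version B (the rewrite author's own statement) =====
-- stated objective: alternative
-- what changed: B builds a (position mod 40, answer value) histogram in one pass and then computes each pattern's score from the 40 residue buckets alone (the three patterns have common period 40), instead of A's replicating each pattern to full length and running one interleaved index loop that compares every answer against all three patterns while updating a dict of counters.
import Mathlib
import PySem

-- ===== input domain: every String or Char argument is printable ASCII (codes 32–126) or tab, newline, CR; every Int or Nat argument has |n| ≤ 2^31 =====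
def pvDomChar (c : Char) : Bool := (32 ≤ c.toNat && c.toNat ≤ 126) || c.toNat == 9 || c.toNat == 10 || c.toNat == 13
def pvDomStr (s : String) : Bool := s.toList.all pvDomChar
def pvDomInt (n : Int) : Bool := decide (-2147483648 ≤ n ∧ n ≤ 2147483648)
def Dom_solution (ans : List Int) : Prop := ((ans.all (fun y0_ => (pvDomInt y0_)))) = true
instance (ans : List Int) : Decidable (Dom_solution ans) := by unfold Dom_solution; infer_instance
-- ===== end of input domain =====

-- B replaces A's replicate-to-full-length patterns and interleaved dict-updating index loop by a
-- (position mod 40, value) histogram built in one pass, from which each pattern's score is read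
-- off over the 40 residue buckets (objective: alternative).

-- ===== PORT A =====
-- math.ceil(len(ans)/len(p)): float division then ceil — exact at these magnitudes; ported as Nat ceiling division
def pvCeil (n k : Nat) : Nat := (n + k - 1) / k

-- the loop body of A's 'for i in range(len(ans))'; dct[k] += 1 is dct.modify; keys 1,2,3 always present.
-- ans[i], a[i], b[i], c[i]: i is always in range here, so pyGetD's default is never used.
def pvStepA (ans a b c : List Int) (d : PySem.Dict Int Int) (i : Int) : PySem.Dict Int Int :=
  let d := if PySem.List.pyGetD ans i 0 = PySem.List.pyGetD a i 0 then d.modify 1 0 (· + 1) else d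
  let d := if PySem.List.pyGetD ans i 0 = PySem.List.pyGetD b i 0 then d.modify 2 0 (· + 1) else d
  if PySem.List.pyGetD ans i 0 = PySem.List.pyGetD c i 0 then d.modify 3 0 (· + 1) else d

def solution (ans : List Int) : List Int :=
  let a : List Int := [1,2,3,4,5]
  let b : List Int := [2,1,2,3,2,4,2,5]
  let c : List Int := [3,3,1,1,2,2,4,4,5,5]
  let a := PySem.List.slice (List.flatten (List.replicate (pvCeil ans.length a.length) a)) none (some (ans.length : Int))
  let b := PySem.List.slice (List.flatten (List.replicate (pvCeil ans.length b.length) b)) none (some (ans.length : Int))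
  let c := PySem.List.slice (List.flatten (List.replicate (pvCeil ans.length c.length) c)) none (some (ans.length : Int))
  let dct : PySem.Dict Int Int := PySem.Dict.ofList [(1,0),(2,0),(3,0)]
  let dct := (PySem.List.pyRange 0 (PySem.List.len ans) 1).foldl (pvStepA ans a b c) dct
  -- max(dct.values()): dct always has three entries, so max never raises; the .getD branch is unreachable
  let m := (PySem.List.max? dct.values (fun v => v)).getD 0
  (dct.items.filter (fun kv => kv.2 == m)).map (fun kv => kv.1)

-- ===== PORT B =====
-- cnt[key] = cnt.get(key, 0) + 1, key = (i % 40, x), over enumerate(ans)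
def pvHist (ans : List Int) : PySem.Dict (Int × Int) Int :=
  (PySem.List.enumerate ans 0).foldl
    (fun d ix =>
      let key : Int × Int := (PySem.Int.mod ix.1 40, ix.2)
      d.insert key (d.getD key 0 + 1))
    PySem.Dict.empty

def solution_alt (ans : List Int) : List Int :=
  let patterns : List (List Int) := [[1,2,3,4,5],[2,1,2,3,2,4,2,5],[3,3,1,1,2,2,4,4,5,5]]
  let cnt := pvHist ans
  -- sum(cnt.get((r, p[r % len(p)]), 0) for r in range(40)); r % len(p) is in range, pyGetD's default unused
  let scores := patterns.map (fun p =>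
    ((PySem.List.pyRange 0 40 1).map
      (fun r => cnt.getD (r, PySem.List.pyGetD p (PySem.Int.mod r (PySem.List.len p)) 0) 0)).sum)
  -- max(scores): three entries, never raises; the .getD branch is unreachable
  let best := (PySem.List.max? scores (fun s => s)).getD 0
  ((PySem.List.pyRange 0 3 1).filter (fun k => PySem.List.pyGetD scores k 0 == best)).map (fun k => k + 1)

-- ===== PRECONDITION & SPEC =====
def Spec_solution (ans : List Int) (out : List Int) : Prop := out = solution_alt ans
instance (ans : List Int) (out : List Int) : Decidable (Spec_solution ans out) := by unfold Spec_solution; infer_instance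

-- ===== CLAIM (what is proved, stated in full; the proofs are below) =====
def Claim_equal_solution : Prop := ∀ (ans : List Int), Dom_solution ans → Spec_solution ans (solution ans)

-- ===== LEMMAS AND PROOFS =====

theorem pvMod1 (x y z : Int) :
    (PySem.Dict.mk [((1:Int),x),(2,y),(3,z)]).modify 1 0 (· + 1) = PySem.Dict.mk [(1,x+1),(2,y),(3,z)] := by
  simp [PySem.Dict.modify, PySem.Dict.insert, PySem.Dict.getD, PySem.Dict.get?, PySem.Dict.contains]

theorem pvMod2 (x y z : Int) :
    (PySem.Dict.mk [((1:Int),x),(2,y),(3,z)]).modify 2 0 (· + 1) = PySem.Dict.mk [(1,x),(2,y+1),(3,z)] := by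
  simp [PySem.Dict.modify, PySem.Dict.insert, PySem.Dict.getD, PySem.Dict.get?, PySem.Dict.contains]

theorem pvMod3 (x y z : Int) :
    (PySem.Dict.mk [((1:Int),x),(2,y),(3,z)]).modify 3 0 (· + 1) = PySem.Dict.mk [(1,x),(2,y),(3,z+1)] := by
  simp [PySem.Dict.modify, PySem.Dict.insert, PySem.Dict.getD, PySem.Dict.get?, PySem.Dict.contains]

-- one iteration of A's loop on the literal-key dict
theorem pvStepA_mk (ans a b c : List Int) (i x y z : Int) :
    pvStepA ans a b c (PySem.Dict.mk [(1,x),(2,y),(3,z)]) i =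
    PySem.Dict.mk
      [(1, x + if PySem.List.pyGetD ans i 0 = PySem.List.pyGetD a i 0 then 1 else 0),
       (2, y + if PySem.List.pyGetD ans i 0 = PySem.List.pyGetD b i 0 then 1 else 0),
       (3, z + if PySem.List.pyGetD ans i 0 = PySem.List.pyGetD c i 0 then 1 else 0)] := by
  unfold pvStepA
  split_ifs <;> simp [pvMod1, pvMod2, pvMod3]

-- A's dict loop over any index list, from a literal-key dict, counts the three match predicates
theorem pvStepA_loop (ans a b c : List Int) (l : List Int) (x y z : Int) :
    l.foldl (pvStepA ans a b c) (PySem.Dict.mk [(1,x),(2,y),(3,z)]) =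
    PySem.Dict.mk
      [(1, x + (l.countP (fun i => PySem.List.pyGetD ans i 0 = PySem.List.pyGetD a i 0) : Int)),
       (2, y + (l.countP (fun i => PySem.List.pyGetD ans i 0 = PySem.List.pyGetD b i 0) : Int)),
       (3, z + (l.countP (fun i => PySem.List.pyGetD ans i 0 = PySem.List.pyGetD c i 0) : Int))] := by
  induction l generalizing x y z with
  | nil => simp
  | cons i t ih =>
    rw [List.foldl_cons, pvStepA_mk, ih]
    simp [List.countP_cons, decide_eq_true_eq]
    split_ifs <;> omega

-- indexing a flattened replication is modular indexing
theorem pvFlatGet (p : List Int) (_hp : 0 < p.length) :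
    ∀ (m j : Nat), j < m * p.length →
      (List.flatten (List.replicate m p))[j]? = p[j % p.length]? := by
  intro m
  induction m with
  | zero => intro j hj; omega
  | succ m ih =>
    intro j hj
    rw [List.replicate_succ, List.flatten_cons]
    by_cases hlt : j < p.length
    · rw [List.getElem?_append_left hlt, Nat.mod_eq_of_lt hlt]
    · push Not at hlt
      rw [List.getElem?_append_right hlt]
      have hj' : j - p.length < m * p.length := by
        have hsm : (m + 1) * p.length = p.length + m * p.length := by ring
        omega
      rw [ih _ hj']
      have hmod : (j - p.length) % p.length = j % p.length := by
        conv_rhs => rw [show j = p.length + (j - p.length) from by omega]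
        rw [Nat.add_mod_left]
      rw [hmod]

-- a replicated-and-truncated pattern indexed at j is the pattern indexed modularly
theorem pvReplGet (p ans : List Int) (hp : 0 < p.length) (j : Nat) (hj : j < ans.length)
    (hb : ans.length ≤ pvCeil ans.length p.length * p.length) :
    PySem.List.pyGetD
      (PySem.List.slice (List.flatten (List.replicate (pvCeil ans.length p.length) p)) none
        (some (ans.length : Int))) (j : Int) 0
      = PySem.List.pyGetD p (PySem.Int.mod (j : Int) (p.length : Int)) 0 := by
  rw [PySem.List.slice_to_natCast, PySem.Int.mod_natCast, PySem.List.pyGetD_natCast,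
      PySem.List.pyGetD_natCast, List.getD_eq_getElem?_getD, List.getD_eq_getElem?_getD,
      List.getElem?_take_of_lt hj, pvFlatGet p hp _ j (by omega)]

-- B's histogram looked up at a key is the key list's count of that key
theorem pvHist_getD (ans : List Int) (k : Int × Int) :
    (pvHist ans).getD k 0 =
      (((PySem.List.enumerate ans 0).map (fun ix => ((PySem.Int.mod ix.1 40, ix.2) : Int × Int))).count k : Nat) := by
  unfold pvHist
  rw [show (fun (d : PySem.Dict (Int × Int) Int) (ix : Int × Int) =>
        let key : Int × Int := (PySem.Int.mod ix.1 40, ix.2);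
        d.insert key (d.getD key 0 + 1))
      = (fun (d : PySem.Dict (Int × Int) Int) (ix : Int × Int) =>
        d.insert (PySem.Int.mod ix.1 40, ix.2) (d.getD (PySem.Int.mod ix.1 40, ix.2) 0 + 1)) from rfl]
  rw [← List.foldl_map (f := fun ix : Int × Int => ((PySem.Int.mod ix.1 40, ix.2) : Int × Int))
        (g := fun (d : PySem.Dict (Int × Int) Int) key => d.insert key (d.getD key 0 + 1))]
  rw [PySem.Dict.getD_foldl_insert_add_one]
  simp [PySem.Dict.getD_empty]

-- summing an indicator over a Nodup list containing a gives the indicator at a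
theorem pvSumIndicator (R : List Int) (hR : R.Nodup) (a b : Int) (f : Int → Int) (ha : a ∈ R) :
    (R.map (fun r => if ((a,b) : Int × Int) = (r, f r) then (1:Int) else 0)).sum
      = if b = f a then 1 else 0 := by
  induction R with
  | nil => cases ha
  | cons r R' ih =>
    rw [List.map_cons, List.sum_cons]
    rcases List.mem_cons.mp ha with h | h
    · subst h
      have hz : (R'.map (fun r => if ((a,b) : Int × Int) = (r, f r) then (1:Int) else 0)).sum = 0 := by
        apply List.sum_eq_zero
        intro x hx
        obtain ⟨r', hr', rfl⟩ := List.mem_map.mp hx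
        have : a ≠ r' := fun h => (List.nodup_cons.mp hR).1 (h ▸ hr')
        simp [Prod.ext_iff, this]
      rw [hz, add_zero]
      by_cases hb : b = f a <;> simp [Prod.ext_iff, hb]
    · have hne : a ≠ r := fun he => (List.nodup_cons.mp hR).1 (he ▸ h)
      rw [ih (List.nodup_cons.mp hR).2 h]
      simp [Prod.ext_iff, hne]

-- summing per-bucket counts over the (nodup) bucket list is counting the matching predicate
theorem pvSumCount (R : List Int) (hR : R.Nodup) (l : List (Int × Int)) (f : Int → Int)
    (hmem : ∀ ab ∈ l, ab.1 ∈ R) :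
    (R.map (fun r => ((l.count ((r, f r) : Int × Int) : Nat) : Int))).sum
      = (l.countP (fun ab => ab.2 == f ab.1) : Int) := by
  induction l with
  | nil => simp
  | cons ab t ih =>
    obtain ⟨a, b⟩ := ab
    have hsplit : ∀ r : Int,
        ((((a,b) :: t).count ((r, f r) : Int × Int) : Nat) : Int)
          = ((t.count ((r, f r) : Int × Int) : Nat) : Int)
            + (if ((a,b) : Int × Int) = (r, f r) then (1:Int) else 0) := by
      intro r
      rw [List.count_cons]
      by_cases h : ((a,b) : Int × Int) = (r, f r)
      · simp [h]
      · have h' : ¬ (((r, f r) : Int × Int) = (a,b)) := fun he => h he.symm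
        simp [List.count, h', h]
    calc (R.map (fun r => ((((a,b) :: t).count ((r, f r) : Int × Int) : Nat) : Int))).sum
        = (R.map (fun r => ((t.count ((r, f r) : Int × Int) : Nat) : Int)
            + (if ((a,b) : Int × Int) = (r, f r) then (1:Int) else 0))).sum := by
          exact congrArg List.sum (List.map_congr_left (fun r _ => hsplit r))
      _ = (R.map (fun r => ((t.count ((r, f r) : Int × Int) : Nat) : Int))).sum
            + (R.map (fun r => if ((a,b) : Int × Int) = (r, f r) then (1:Int) else 0)).sum := by
          rw [← List.sum_map_add]
      _ = (t.countP (fun ab => ab.2 == f ab.1) : Int) + (if b = f a then (1:Int) else 0) := by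
          rw [ih (fun x hx => hmem x (List.mem_cons_of_mem _ hx)),
              pvSumIndicator R hR a b f (hmem (a,b) List.mem_cons_self)]
      _ = (((a,b) :: t).countP (fun ab => ab.2 == f ab.1) : Int) := by
          rw [List.countP_cons]
          by_cases h : b = f a <;> simp [h]

-- the final argmax/filter step agrees between the two shapes, for any three scores
theorem pvFinal (s1 s2 s3 : Int) :
    (List.filter
        (fun kv => kv.2 == (PySem.List.max?
            (PySem.Dict.mk [((1:Int),s1),(2,s2),(3,s3)]).values (fun v => v)).getD 0)
        (PySem.Dict.mk [((1:Int),s1),(2,s2),(3,s3)]).items).map (fun kv => kv.1)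
    = ((PySem.List.pyRange 0 3 1).filter
        (fun k => PySem.List.pyGetD [s1,s2,s3] k 0 == (PySem.List.max? [s1,s2,s3] (fun s => s)).getD 0)).map
        (fun k => k + 1) := by
  rw [show (PySem.Dict.mk [((1:Int),s1),(2,s2),(3,s3)]).values = [s1,s2,s3] from rfl]
  generalize (PySem.List.max? [s1,s2,s3] fun s => s).getD 0 = m
  rw [show (PySem.Dict.mk [((1:Int),s1),(2,s2),(3,s3)]).items = [(1,s1),(2,s2),(3,s3)] from rfl,
      show PySem.List.pyRange 0 3 1 = [(0:Int),1,2] from rfl]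
  cases h1 : s1 == m <;> cases h2 : s2 == m <;> cases h3 : s3 == m <;>
    simp [List.filter, PySem.List.pyGetD, h1, h2, h3]

-- ===== VERDICT (by name: the statement is the Claim_ definition above) =====
theorem solution_spec : Claim_equal_solution := by
  intro ans _
  unfold Spec_solution
  simp only [solution, solution_alt]
  have hof : PySem.Dict.ofList [((1:Int),(0:Int)),(2,0),(3,0)]
      = PySem.Dict.mk [(1,0),(2,0),(3,0)] := by decide
  rw [hof, pvStepA_loop]
  simp only [zero_add, List.map_cons, List.map_nil]
  -- B's score for pattern p equals the modular-match count over the index range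
  have hscore : ∀ (p : List Int), 0 < p.length → p.length ∣ 40 →
      ((PySem.List.pyRange 0 40 1).map
        (fun r => (pvHist ans).getD (r, PySem.List.pyGetD p (PySem.Int.mod r (PySem.List.len p)) 0) 0)).sum
      = ((PySem.List.pyRange 0 (PySem.List.len ans) 1).countP
          (fun i => decide (PySem.List.pyGetD ans i 0
              = PySem.List.pyGetD p (PySem.Int.mod i (PySem.List.len p)) 0)) : Int) := by
    intro p hp hdvd
    set f : Int → Int := fun r => PySem.List.pyGetD p (PySem.Int.mod r (PySem.List.len p)) 0 with hf
    have h1 : ∀ r : Int,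
        (pvHist ans).getD (r, f r) 0
          = ((((PySem.List.enumerate ans 0).map
              (fun ix => ((PySem.Int.mod ix.1 40, ix.2) : Int × Int))).count ((r, f r) : Int × Int) : Nat) : Int) :=
      fun r => pvHist_getD ans (r, f r)
    rw [List.map_congr_left (fun r _ => h1 r)]
    rw [pvSumCount (PySem.List.pyRange 0 40 1) (by decide)
          ((PySem.List.enumerate ans 0).map (fun ix => ((PySem.Int.mod ix.1 40, ix.2) : Int × Int))) f
          ?_]
    · rw [List.countP_map]
      rw [PySem.List.enumerate_eq_map_pyRange (d := 0), List.countP_map]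
      apply congrArg
      apply List.countP_congr
      intro i hi
      rw [PySem.List.len_eq] at hi
      rw [PySem.List.mem_pyRange_one] at hi
      obtain ⟨j, rfl⟩ : ∃ j : Nat, i = (j : Int) := ⟨i.toNat, by omega⟩
      simp only [Function.comp_def, hf]
      have hmm : PySem.Int.mod (PySem.Int.mod (j : Int) 40) (PySem.List.len p)
          = PySem.Int.mod (j : Int) (PySem.List.len p) := by
        rw [PySem.List.len_eq, show ((40:Int)) = ((40:Nat) : Int) from rfl,
            PySem.Int.mod_natCast, PySem.Int.mod_natCast, PySem.Int.mod_natCast]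
        exact congrArg (fun n : Nat => ((n : Int))) (Nat.mod_mod_of_dvd j hdvd)
      rw [hmm]
      simp [beq_iff_eq]
    · intro ab hab
      obtain ⟨ix, hix, rfl⟩ := List.mem_map.mp hab
      rw [PySem.List.enumerate_eq_map_pyRange (d := 0)] at hix
      obtain ⟨j, hj, rfl⟩ := List.mem_map.mp hix
      rw [PySem.List.len_eq, PySem.List.mem_pyRange_one] at hj
      obtain ⟨k, rfl⟩ : ∃ k : Nat, j = (k : Int) := ⟨j.toNat, by omega⟩
      rw [PySem.List.mem_pyRange_one]
      simp only [show ((40:Int)) = ((40:Nat) : Int) from rfl, PySem.Int.mod_natCast]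
      constructor
      · positivity
      · exact_mod_cast Nat.mod_lt k (by norm_num)
  rw [hscore [1,2,3,4,5] (by decide) (by decide),
      hscore [2,1,2,3,2,4,2,5] (by decide) (by decide),
      hscore [3,3,1,1,2,2,4,4,5,5] (by decide) (by decide)]
  -- A's count against the replicated pattern equals the modular count
  have key : ∀ (p : List Int), 0 < p.length →
      ans.length ≤ pvCeil ans.length p.length * p.length →
      (PySem.List.pyRange 0 (PySem.List.len ans) 1).countP
        (fun i => decide (PySem.List.pyGetD ans i 0 = PySem.List.pyGetD
          (PySem.List.slice (List.flatten (List.replicate (pvCeil ans.length p.length) p)) none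
            (some (ans.length : Int))) i 0))
      = (PySem.List.pyRange 0 (PySem.List.len ans) 1).countP
        (fun i => decide (PySem.List.pyGetD ans i 0
            = PySem.List.pyGetD p (PySem.Int.mod i (PySem.List.len p)) 0)) := by
    intro p hp hb
    apply List.countP_congr
    intro i hi
    rw [PySem.List.len_eq] at hi
    rw [PySem.List.mem_pyRange_one] at hi
    obtain ⟨j, rfl⟩ : ∃ j : Nat, i = (j : Int) := ⟨i.toNat, by omega⟩
    have hj : j < ans.length := by exact_mod_cast hi.2
    rw [pvReplGet p ans hp j hj hb, PySem.List.len_eq]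
  rw [key [1,2,3,4,5] (by decide) (by show ans.length ≤ pvCeil ans.length 5 * 5; unfold pvCeil; omega),
      key [2,1,2,3,2,4,2,5] (by decide) (by show ans.length ≤ pvCeil ans.length 8 * 8; unfold pvCeil; omega),
      key [3,3,1,1,2,2,4,4,5,5] (by decide) (by show ans.length ≤ pvCeil ans.length 10 * 10; unfold pvCeil; omega)]
  exact pvFinal _ _ _
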